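-- pv_equiv track=rewrite | github.com/tle46/CS-1301 | HW09.py | balancedStr
-- ===== SOURCE A (Python) =====
-- def balancedStr(strInput):
--     if len(strInput) < 2:
--         output = True
--     else:
--         if strInput[0].isupper() == strInput[-1].isupper():
--             output = True
--         else:
--             output = False
--         output = output and balancedStr(strInput[1:-1])
--     return output
-- ===== SOURCE B (Python) =====
-- def balancedStr(strInput):
--     n = len(strInput)
--     return all(strInput[i].isupper() == strInput[n - 1 - i].isupper()
--                for i in range(n // 2))
-- ===== Notes on version B (the rewrite author's own statement) =====
-- stated objective: faster
-- what changed: Replaced the recursive peel-both-ends-and-slice (each call copies the string, O(n^2)) by a single pass over the first half comparing isupper of symmetric characters, O(n).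
import Mathlib
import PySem

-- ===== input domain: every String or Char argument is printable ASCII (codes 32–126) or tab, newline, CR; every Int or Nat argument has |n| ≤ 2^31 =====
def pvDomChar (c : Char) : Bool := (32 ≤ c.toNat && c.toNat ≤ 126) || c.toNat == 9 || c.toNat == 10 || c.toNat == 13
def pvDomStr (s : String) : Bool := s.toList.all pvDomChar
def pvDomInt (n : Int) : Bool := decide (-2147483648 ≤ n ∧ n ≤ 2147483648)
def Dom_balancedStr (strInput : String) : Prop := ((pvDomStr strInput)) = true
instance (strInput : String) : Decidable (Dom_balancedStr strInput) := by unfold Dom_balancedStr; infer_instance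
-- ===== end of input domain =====

-- B replaces A's recursive peel-both-ends-and-slice (each step slices a copy) by a
-- single pass over the first half comparing isupper of symmetric characters.

-- ===== PORT A =====
-- A step for step on the character list: len < 2 → True; else compare isupper of
-- s[0] and s[-1] and recurse on s[1:-1].
def balancedChars (cs : List Char) : Bool :=
  if cs.length < 2 then true
  else
    (if PySem.Chars.isupper (PySem.List.pyGetD cs 0 ' ')
        == PySem.Chars.isupper (PySem.List.pyGetD cs (-1) ' ') then true else false)
      && balancedChars (PySem.List.slice cs (some 1) (some (-1)))
termination_by cs.length
decreasing_by
  have h := PySem.List.length_slice cs (1 : Int) (-1)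
  simp only [PySem.List.clampIdx_neg_one] at h
  have h1 : PySem.List.clampIdx cs.length (1 : Int) = min 1 cs.length := by
    simpa using PySem.List.clampIdx_natCast cs.length 1
  omega

def balancedStr (strInput : String) : Bool := balancedChars strInput.toList

-- ===== PORT B =====
-- Source B: all(s[i].isupper() == s[n-1-i].isupper() for i in range(n // 2))
def balancedStr_alt (strInput : String) : Bool :=
  let cs := strInput.toList
  let n := cs.length
  (List.range (n / 2)).all (fun i =>
    PySem.Chars.isupper (cs.getD i ' ') == PySem.Chars.isupper (cs.getD (n - 1 - i) ' '))

-- ===== PRECONDITION & SPEC =====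
def Spec_balancedStr (strInput : String) (out : Bool) : Prop := out = balancedStr_alt strInput
instance (strInput : String) (out : Bool) : Decidable (Spec_balancedStr strInput out) := by unfold Spec_balancedStr; infer_instance

-- ===== CLAIM (what is proved, stated in full; the proofs are below) =====
def Claim_equal_balancedStr : Prop := ∀ (strInput : String), Dom_balancedStr strInput → Spec_balancedStr strInput (balancedStr strInput)

-- ===== LEMMAS AND PROOFS =====

lemma slice_one_neg_one (c d : Char) (mid : List Char) :
    PySem.List.slice ((c :: mid) ++ [d]) (some 1) (some (-1)) = mid := by
  rw [show ((1:Int)) = ((1:Nat):Int) by norm_num]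
  simp [PySem.List.slice, PySem.List.clampIdx]
  rw [if_neg (by omega)]
  simp

lemma all_congr_mem (p q : Nat → Bool) (l : List Nat) (h : ∀ x ∈ l, p x = q x) :
    l.all p = l.all q := by
  induction l with
  | nil => rfl
  | cons a l ih => simp_all

-- B's check, on the character list (so the invariant can be stated structurally)
def halfCheck (cs : List Char) : Bool :=
  (List.range (cs.length / 2)).all (fun i =>
    PySem.Chars.isupper (cs.getD i ' ')
      == PySem.Chars.isupper (cs.getD (cs.length - 1 - i) ' '))

lemma balancedChars_eq (cs : List Char) : balancedChars cs = halfCheck cs := by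
  induction cs using balancedChars.induct with
  | case1 x h =>
    have h0 : x.length / 2 = 0 := by omega
    rw [balancedChars, if_pos h]
    simp [halfCheck, h0]
  | case2 x h IH =>
    obtain ⟨c, t, rfl⟩ : ∃ c t, x = c :: t := by
      cases x with
      | nil => simp at h
      | cons a l => exact ⟨a, l, rfl⟩
    have ht : t ≠ [] := by
      intro hnil; rw [hnil] at h; simp at h
    obtain ⟨mid, d, rfl⟩ : ∃ mid d, t = mid ++ [d] :=
      ⟨t.dropLast, t.getLast ht, (List.dropLast_append_getLast ht).symm⟩
    have hx : c :: (mid ++ [d]) = (c :: mid) ++ [d] := by simp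
    rw [hx, slice_one_neg_one] at IH
    rw [balancedChars, if_neg h, hx, slice_one_neg_one,
        PySem.List.pyGetD_neg_one_append_singleton, ← hx,
        PySem.List.pyGetD_zero_cons, IH]
    have hlen : (c :: (mid ++ [d])).length = mid.length + 2 := by simp
    have hdiv : (mid.length + 2) / 2 = mid.length / 2 + 1 := by omega
    unfold halfCheck
    rw [hlen, hdiv, List.range_succ_eq_map, List.all_cons, List.all_map]
    have htail : ((c :: (mid ++ [d])).getD (mid.length + 2 - 1 - 0) ' ') = d := by
      have h1 : mid.length + 2 - 1 - 0 = mid.length + 1 := by omega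
      rw [h1, List.getD_cons_succ, List.getD, List.getElem?_concat_length]
      rfl
    have head : ((c :: (mid ++ [d])).getD 0 ' ') = c := rfl
    rw [head, htail]
    have hcong : ∀ i ∈ List.range (mid.length / 2),
        ((fun i => PySem.Chars.isupper ((c :: (mid ++ [d])).getD i ' ')
          == PySem.Chars.isupper ((c :: (mid ++ [d])).getD (mid.length + 2 - 1 - i) ' ')) ∘ Nat.succ) i
        = (fun i => PySem.Chars.isupper (mid.getD i ' ')
          == PySem.Chars.isupper (mid.getD (mid.length - 1 - i) ' ')) i := by
      intro i hi
      rw [List.mem_range] at hi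
      have him : i < mid.length := by omega
      simp only [Function.comp, Nat.succ_eq_add_one]
      have e1 : (c :: (mid ++ [d])).getD (i + 1) ' ' = mid.getD i ' ' := by
        rw [List.getD_cons_succ, List.getD, List.getD, List.getElem?_append_left him]
      have eidx : mid.length + 2 - 1 - (i + 1) = (mid.length - 1 - i) + 1 := by omega
      have e2 : (c :: (mid ++ [d])).getD (mid.length + 2 - 1 - (i + 1)) ' '
          = mid.getD (mid.length - 1 - i) ' ' := by
        have hlt : mid.length - 1 - i < mid.length := by omega
        rw [eidx, List.getD_cons_succ, List.getD, List.getD, List.getElem?_append_left hlt]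
      rw [e1, e2]
    rw [all_congr_mem _ _ _ hcong]
    cases PySem.Chars.isupper c == PySem.Chars.isupper d <;> simp

-- ===== VERDICT (by name: the statement is the Claim_ definition above) =====
theorem balancedStr_spec : Claim_equal_balancedStr := by
  intro s _
  unfold Spec_balancedStr balancedStr balancedStr_alt
  exact balancedChars_eq s.toList
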